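-- pv_equiv track=rewrite | github.com/LeDawaa/IAS | recognition.py | group_components_by_line
-- ===== SOURCE A (Python) =====
-- def group_components_by_line(stats, y_tolerance=20):
--     # Sort the stats array (excluding the background component at index 0) by the top-left y-coordinate (stat[1]) and then by the top-left x-coordinate (stat[0])
--     stats_sorted = sorted(stats[1:], key=lambda stat: (stat[1], stat[0]))
--
--     # Initialize the list of grouped stats and the current line
--     grouped_stats = []
--     current_line = []
--
--     # Iterate through the sorted stats
--     for stat in stats_sorted:
--         # If the current line is empty, add the first stat to the line
--         if not current_line:
--             current_line.append(stat)
--         # If the vertical distance between the current stat and the previous stat is less than or equal to y_tolerance,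
--         # it means they belong to the same line, so add the current stat to the current line
--         elif abs(stat[1] - current_line[-1][1]) <= y_tolerance:
--             current_line.append(stat)
--         # If the vertical distance is greater than y_tolerance, it means we have reached a new line
--         else:
--             # Sort the current line by the top-left x-coordinate (s[0]) and append it to the grouped_stats list
--             grouped_stats.append(sorted(current_line, key=lambda s: s[0]))
--             # Reset the current line to start a new line with the current stat
--             current_line = [stat]
--
--     # If there are any remaining stats in the current line, sort them by the top-left x-coordinate (s[0]) and append them to the grouped_stats list
--     if current_line:
--         grouped_stats.append(sorted(current_line, key=lambda s: s[0]))
--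
--     return grouped_stats
-- ===== SOURCE B (Python) =====
-- def group_components_by_line(stats, y_tolerance=20):
--     # Sort everything but the background component by (y, x).
--     srt = sorted(stats[1:], key=lambda s: (s[1], s[0]))
--     groups = []
--     # Repeatedly split off the maximal leading chain of y-close neighbours.
--     while srt:
--         k = 1
--         while k < len(srt) and abs(srt[k][1] - srt[k - 1][1]) <= y_tolerance:
--             k += 1
--         line, srt = srt[:k], srt[k:]
--         groups.append(sorted(line, key=lambda s: s[0]))
--     return groups
-- ===== Notes on version B (the rewrite author's own statement) =====
-- stated objective: alternative
-- what changed: Replaces A's single fold with a current-line accumulator and a final flush by an outer loop that repeatedly splits off the maximal leading chain of y-close elements from the sorted list, sorting each extracted segment by x as it is emitted (no trailing-group special case).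
import Mathlib
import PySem

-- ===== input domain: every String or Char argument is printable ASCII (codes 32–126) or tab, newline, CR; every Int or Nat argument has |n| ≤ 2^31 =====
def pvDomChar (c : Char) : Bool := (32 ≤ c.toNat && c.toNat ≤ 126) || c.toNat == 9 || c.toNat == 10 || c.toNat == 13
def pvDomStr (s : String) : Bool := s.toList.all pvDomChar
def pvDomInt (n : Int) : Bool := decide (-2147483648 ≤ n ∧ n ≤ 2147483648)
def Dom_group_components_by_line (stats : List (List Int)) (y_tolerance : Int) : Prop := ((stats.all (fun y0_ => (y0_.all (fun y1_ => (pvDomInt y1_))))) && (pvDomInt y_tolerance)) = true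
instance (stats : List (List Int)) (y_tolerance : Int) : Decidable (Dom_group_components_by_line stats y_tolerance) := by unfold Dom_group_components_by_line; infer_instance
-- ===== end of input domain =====

-- B trades A's fold-with-accumulator-and-final-flush for repeated extraction of the maximal
-- leading y-chain from the sorted list (objective: alternative decomposition, same cost).

-- shared helpers: stat[1] and stat[0] (total via default; Pre_ guarantees the index is in range)
def pvY (s : List Int) : Int := PySem.List.pyGetD s 1 0
def pvX (s : List Int) : Int := PySem.List.pyGetD s 0 0

-- ===== PORT A =====
def pvStepA (tol : Int) (acc : List (List (List Int)) × List (List Int)) (stat : List Int) :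
    List (List (List Int)) × List (List Int) :=
  if acc.2 = [] then (acc.1, acc.2 ++ [stat])
  else if |pvY stat - pvY (PySem.List.pyGetD acc.2 (-1) [])| ≤ tol then (acc.1, acc.2 ++ [stat])
  else (acc.1 ++ [PySem.List.sorted acc.2 pvX false], [stat])

def group_components_by_line (stats : List (List Int)) (y_tolerance : Int) : List (List (List Int)) :=
  let stats_sorted := PySem.List.sorted2 (PySem.List.slice stats (some 1) none) pvY pvX
  let r := stats_sorted.foldl (pvStepA y_tolerance) ([], [])
  if r.2 = [] then r.1 else r.1 ++ [PySem.List.sorted r.2 pvX false]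

-- ===== PORT B =====
-- inner while loop: split the maximal leading chain (each element y-close to its predecessor,
-- starting from previous y-value py) off the front of the list
def pvTakeLine (tol : Int) (py : Int) : List (List Int) → List (List Int) × List (List Int)
  | [] => ([], [])
  | s :: rest =>
    if |pvY s - py| ≤ tol then
      let t := pvTakeLine tol (pvY s) rest
      (s :: t.1, t.2)
    else ([], s :: rest)

theorem pvTakeLine_snd_length (tol py : Int) (l : List (List Int)) :
    (pvTakeLine tol py l).2.length ≤ l.length := by
  induction l generalizing py with
  | nil => simp [pvTakeLine]
  | cons s rest ih =>
    simp only [pvTakeLine]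
    split
    · exact le_trans (ih (pvY s)) (Nat.le_succ _)
    · simp

-- outer while loop: emit one x-sorted line per extracted chain
def pvGroupRec (tol : Int) : List (List Int) → List (List (List Int))
  | [] => []
  | s :: rest =>
    let t := pvTakeLine tol (pvY s) rest
    PySem.List.sorted (s :: t.1) pvX false :: pvGroupRec tol t.2
termination_by l => l.length
decreasing_by
  exact Nat.lt_succ_of_le (pvTakeLine_snd_length tol (pvY s) rest)

def group_components_by_line_alt (stats : List (List Int)) (y_tolerance : Int) : List (List (List Int)) :=
  pvGroupRec y_tolerance (PySem.List.sorted2 (PySem.List.slice stats (some 1) none) pvY pvX)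

-- ===== PRECONDITION & SPEC =====
-- Pre_ excludes exactly the inputs where Python A raises IndexError: a component row after the
-- background entry with fewer than 2 fields (stat[1] in the sort key / the loop test).
def Pre_group_components_by_line (stats : List (List Int)) (y_tolerance : Int) : Prop :=
  ∀ s ∈ stats.tail, 2 ≤ s.length
instance (stats : List (List Int)) (y_tolerance : Int) : Decidable (Pre_group_components_by_line stats y_tolerance) := by unfold Pre_group_components_by_line; infer_instance

def pvWitness_group_components_by_line : List (List Int) × Int := ([[9, 9], [1, 2], [3, 4], [5, 30]], 5)

def Spec_group_components_by_line (stats : List (List Int)) (y_tolerance : Int) (out : List (List (List Int))) : Prop := out = group_components_by_line_alt stats y_tolerance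
instance (stats : List (List Int)) (y_tolerance : Int) (out : List (List (List Int))) : Decidable (Spec_group_components_by_line stats y_tolerance out) := by unfold Spec_group_components_by_line; infer_instance

-- ===== CLAIM (what is proved, stated in full; the proofs are below) =====
def Claim_equal_group_components_by_line : Prop := ∀ (stats : List (List Int)) (y_tolerance : Int), Dom_group_components_by_line stats y_tolerance → Pre_group_components_by_line stats y_tolerance → Spec_group_components_by_line stats y_tolerance (group_components_by_line stats y_tolerance)

-- ===== LEMMAS AND PROOFS =====

-- A's loop, started with a nonempty current line written as cur ++ [p], flushes exactly the
-- chain B's pvTakeLine extracts, and then proceeds like B on the remainder.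
theorem pvLoop_eq (tol : Int) (l : List (List Int)) :
    ∀ (g : List (List (List Int))) (cur : List (List Int)) (p : List Int),
    (let r := l.foldl (pvStepA tol) (g, cur ++ [p])
     if r.2 = [] then r.1 else r.1 ++ [PySem.List.sorted r.2 pvX false])
    = g ++ PySem.List.sorted (cur ++ [p] ++ (pvTakeLine tol (pvY p) l).1) pvX false
        :: pvGroupRec tol (pvTakeLine tol (pvY p) l).2 := by
  induction l with
  | nil =>
    intro g cur p
    simp [pvTakeLine, pvGroupRec]
  | cons s rest ih =>
    intro g cur p
    simp only [List.foldl_cons, pvStepA, List.append_eq_nil_iff, List.cons_ne_self, and_false,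
      if_false, PySem.List.pyGetD_neg_one_append_singleton]
    by_cases h : |pvY s - pvY p| ≤ tol
    · rw [if_pos h]
      have := ih g (cur ++ [p]) s
      simp only [List.append_assoc] at this ⊢
      rw [this]
      simp [pvTakeLine, h]
    · rw [if_neg h]
      have := ih (g ++ [PySem.List.sorted (cur ++ [p]) pvX false]) [] s
      simp only [List.nil_append] at this
      rw [this]
      simp only [pvTakeLine, h]
      simp [pvGroupRec]

-- ===== VERDICT (by name: the statement is the Claim_ definition above) =====
theorem group_components_by_line_spec : Claim_equal_group_components_by_line := by
  intro stats tol _ _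
  unfold Spec_group_components_by_line group_components_by_line group_components_by_line_alt
  cases h : PySem.List.sorted2 (PySem.List.slice stats (some 1) none) pvY pvX with
  | nil => simp [pvGroupRec]
  | cons s rest =>
    simp only [List.foldl_cons, pvStepA, if_true, List.nil_append]
    have := pvLoop_eq tol rest [] [] s
    simp only [List.nil_append] at this
    rw [this]
    simp [pvGroupRec]
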